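-- pv_equiv track=rewrite | github.com/Dev2-dipanetech/stock-balance_another_way | stock_balance___another_way/stock_balance___another_way.py | cumulate_data
-- ===== SOURCE A (Python) =====
-- def cumulate_data(data,ls_date):
-- 	sum = 0
-- 	r = len(ls_date)
-- 	for dict in data:
-- 		if ls_date[0] not in dict.keys():
-- 			dict[ls_date[0]] = 0
--
-- 		for i in range(1,r):
-- 			if ls_date[i] not in dict.keys():
-- 				dict[ls_date[i]] = dict[ls_date[i-1]]
-- 			else:
-- 				dict[ls_date[i]] += dict[ls_date[i-1]]
-- 	return data
-- ===== SOURCE B (Python) =====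
-- def cumulate_data(data, ls_date):
--     # Return-value equivalence; like A, this mutates the dicts in data in place.
--     # Loop interchange: walk the dates OUTER and the dicts INNER, carrying one
--     # vector of running totals (one slot per dict) instead of A's per-dict index
--     # loop that branches on key presence and reads dict[ls_date[i-1]] back out.
--     totals = [0] * len(data)
--     for date in ls_date:
--         for k, d in enumerate(data):
--             totals[k] += d.get(date, 0)
--             d[date] = totals[k]
--     return data
-- ===== Notes on version B (the rewrite author's own statement) =====
-- stated objective: alternative
-- what changed: The loops are interchanged: instead of A's per-dict inner index loop that branches on key presence and reads the previous date's value back out of the dict, B walks the dates in the outer loop and all dicts in the inner loop, maintaining one vector of running totals (one slot per dict) and doing a single unconditional update per (date, dict).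
-- outside the precondition, e.g. on cumulate_data([{'a': 1}], []): A raises IndexError, B returns [{'a': 1}]
import Mathlib
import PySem

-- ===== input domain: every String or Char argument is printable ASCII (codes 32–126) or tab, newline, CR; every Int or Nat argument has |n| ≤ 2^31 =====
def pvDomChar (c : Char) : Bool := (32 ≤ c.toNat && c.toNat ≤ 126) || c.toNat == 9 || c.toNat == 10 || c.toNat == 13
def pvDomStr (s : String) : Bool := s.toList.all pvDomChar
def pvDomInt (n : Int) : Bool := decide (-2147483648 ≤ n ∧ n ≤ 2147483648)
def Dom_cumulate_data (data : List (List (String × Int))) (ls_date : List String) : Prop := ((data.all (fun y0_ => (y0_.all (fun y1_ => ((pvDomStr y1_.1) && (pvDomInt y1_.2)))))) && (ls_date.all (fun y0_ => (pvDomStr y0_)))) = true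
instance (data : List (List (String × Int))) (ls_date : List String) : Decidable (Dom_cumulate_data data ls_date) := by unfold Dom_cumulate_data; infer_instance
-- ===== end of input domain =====

-- B interchanges A's loops: dates outer, dicts inner, with a vector of running totals
-- (one per dict) replacing A's presence branch and read-back of dict[ls_date[i-1]]
-- (alternative traversal, same cost); return-value equivalence only — both Pythons
-- mutate the dicts in `data` in place in the same way.


-- ===== PORT A =====
-- Inner loop of A over one dict; indices inside range(1, r) are always in range, and the
-- dict lookups dict[ls_date[i]] / dict[ls_date[i-1]] never miss (the key was ensured/inserted
-- one step earlier), so pyGetD/getD are exact here; ls_date[0] can only raise on ls_date = []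
-- (excluded by Pre_ when data ≠ []).
def cumStepA (ls : List String) (d : PySem.Dict String Int) : PySem.Dict String Int :=
  let first := PySem.List.pyGetD ls 0 ""
  let d0 := if (d.get? first).isNone then d.insert first 0 else d
  (PySem.List.pyRange 1 (ls.length : Int) 1).foldl
    (fun d i =>
      let cur := PySem.List.pyGetD ls i ""
      let prev := PySem.List.pyGetD ls (i - 1) ""
      match d.get? cur with
      | none => d.insert cur (d.getD prev 0)
      | some v => d.insert cur (v + d.getD prev 0)) d0

def cumulate_data (data : List (List (String × Int))) (ls_date : List String) : List (List (String × Int)) :=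
  data.map (fun d => (cumStepA ls_date (PySem.Dict.mk d)).items)

-- ===== PORT B =====
-- State of B's outer date loop: the list of dicts and the parallel totals vector
-- ('for k, d in enumerate(data): totals[k] += d.get(date, 0); d[date] = totals[k]'
-- is the simultaneous indexed update of both lists, ported as a map over their zip).
def colStep (p : List (PySem.Dict String Int) × List Int) (date : String) :
    List (PySem.Dict String Int) × List Int :=
  let pairs := (p.1.zip p.2).map (fun q =>
    let t := q.2 + q.1.getD date 0
    (q.1.insert date t, t))
  (pairs.map Prod.fst, pairs.map Prod.snd)

def cumulate_data_alt (data : List (List (String × Int))) (ls_date : List String) : List (List (String × Int)) :=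
  let ds := data.map PySem.Dict.mk
  let totals : List Int := List.replicate data.length 0
  (ls_date.foldl colStep (ds, totals)).1.map PySem.Dict.items

-- ===== PRECONDITION & SPEC =====
-- Pre_ excludes (i) the inputs where A raises IndexError (non-empty data with empty ls_date:
-- A touches ls_date[0]; B there returns data unchanged) and (ii) inner association lists with
-- duplicate keys, which do not represent a Python dict at all (a dict's keys are unique);
-- nothing on which A returns a value of the type is excluded.
def Pre_cumulate_data (data : List (List (String × Int))) (ls_date : List String) : Prop :=
  (data = [] ∨ ls_date ≠ []) ∧ ∀ d ∈ data, (d.map Prod.fst).Nodup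
instance (data : List (List (String × Int))) (ls_date : List String) : Decidable (Pre_cumulate_data data ls_date) := by unfold Pre_cumulate_data; infer_instance

def pvWitness_cumulate_data : (List (List (String × Int))) × List String :=
  ([[("a", 3), ("b", -1)], []], ["a", "c", "b"])

def Spec_cumulate_data (data : List (List (String × Int))) (ls_date : List String) (out : List (List (String × Int))) : Prop := out = cumulate_data_alt data ls_date
instance (data : List (List (String × Int))) (ls_date : List String) (out : List (List (String × Int))) : Decidable (Spec_cumulate_data data ls_date out) := by unfold Spec_cumulate_data; infer_instance

-- ===== CLAIM (what is proved, stated in full; the proofs are below) =====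
def Claim_equal_cumulate_data : Prop := ∀ (data : List (List (String × Int))) (ls_date : List String), Dom_cumulate_data data ls_date → Pre_cumulate_data data ls_date → Spec_cumulate_data data ls_date (cumulate_data data ls_date)

-- ===== LEMMAS AND PROOFS =====

-- Proof-only bridge: the per-dict running-accumulator fold (column k of B's interchanged
-- loop), which A's index loop is first shown to equal.
def accPair (ls : List String) (q : PySem.Dict String Int × Int) :
    PySem.Dict String Int × Int :=
  ls.foldl
    (fun (p : PySem.Dict String Int × Int) date =>
      let running := p.2 + p.1.getD date 0
      (p.1.insert date running, running)) q

-- Re-inserting a key with its current value is a no-op on a nodup-keyed dict.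
theorem insert_get?_self (d : PySem.Dict String Int) (k : String) (v : Int)
    (hnd : d.keys.Nodup) (h : d.get? k = some v) : d.insert k v = d := by
  apply PySem.Dict.ext
  rw [PySem.Dict.items_insert_of_contains]
  · refine (List.map_congr_left ?_).trans (List.map_id _)
    rintro ⟨a, b⟩ hp
    by_cases hk : a = k
    · have hg : d.get? k = some b := by
        have := PySem.Dict.get?_of_mem_items (d := d) (k := a) (v := b) hp hnd
        rwa [hk] at this
      rw [h] at hg
      simp [hk, Option.some_inj.mp hg]
    · simp [hk]
  · rw [PySem.Dict.contains_eq_isSome_get?, h]; rfl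

-- Loop correspondence: A's index loop from index j+1 equals the running-accumulator fold
-- over the remaining dates, given the invariant run = current value at the previous date.
theorem loopAB (xs : List String) : ∀ (full : List String) (j : Nat) (d : PySem.Dict String Int) (run : Int),
    full.drop (j+1) = xs →
    d.getD (full.getD j "") 0 = run →
    (PySem.List.pyRange ((j : Int)+1) (full.length : Int) 1).foldl
      (fun d i =>
        let cur := PySem.List.pyGetD full i ""
        let prev := PySem.List.pyGetD full (i - 1) ""
        match d.get? cur with
        | none => d.insert cur (d.getD prev 0)
        | some v => d.insert cur (v + d.getD prev 0)) d
    = (accPair xs (d, run)).1 := by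
  induction xs with
  | nil =>
    intro full j d run hdrop hrun
    have hlen : full.length ≤ j + 1 := by
      have := congrArg List.length hdrop
      simp at this; omega
    have hnilrange : PySem.List.pyRange ((j : Int)+1) (full.length : Int) 1 = [] := by
      apply List.eq_nil_iff_forall_not_mem.mpr
      intro x hx
      have := PySem.List.mem_pyRange_one.mp hx
      omega
    rw [hnilrange]; rfl
  | cons c rest ih =>
    intro full j d run hdrop hrun
    have hj1 : j + 1 < full.length := by
      have := congrArg List.length hdrop
      simp at this; omega
    have hc : full.getD (j+1) "" = c := by
      have h0 : (full.drop (j+1)).getD 0 "" = c := by rw [hdrop]; rfl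
      rwa [List.getD_eq_getElem?_getD, List.getElem?_drop, Nat.add_zero,
        ← List.getD_eq_getElem?_getD] at h0
    have hcast : ((j : Int) + 1) = ((j + 1 : Nat) : Int) := by push_cast; ring
    have hcur : PySem.List.pyGetD full ((j : Int)+1) "" = c := by
      rw [hcast, PySem.List.pyGetD_natCast, hc]
    have hprev : PySem.List.pyGetD full ((j : Int)+1-1) "" = full.getD j "" := by
      have h1 : (j : Int)+1-1 = ((j : Nat) : Int) := by ring
      rw [h1, PySem.List.pyGetD_natCast]
    rw [PySem.List.pyRange_one_cons (by exact_mod_cast hj1)]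
    simp only [List.foldl_cons]
    have hacc : (match d.get? (PySem.List.pyGetD full ((j : Int)+1) "") with
        | none => d.insert (PySem.List.pyGetD full ((j : Int)+1) "") (d.getD (PySem.List.pyGetD full ((j : Int)+1-1) "") 0)
        | some v => d.insert (PySem.List.pyGetD full ((j : Int)+1) "") (v + d.getD (PySem.List.pyGetD full ((j : Int)+1-1) "") 0))
        = d.insert c (run + d.getD c 0) := by
      rw [hcur, hprev]
      cases hg : d.get? c with
      | none => simp only [PySem.Dict.getD_of_get?_eq_none d 0 hg, hrun, add_zero]
      | some v => simp only [PySem.Dict.getD_of_get?_eq_some d 0 hg, hrun]; rw [add_comm]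
    rw [hacc, hcast,
      ih full (j+1) (d.insert c (run + d.getD c 0)) (run + d.getD c 0)
        (by rw [← List.drop_drop, hdrop]; rfl)
        (by rw [hc, PySem.Dict.getD_insert_self])]
    rfl

theorem stepA_eq_acc (ls : List String) (hls : ls ≠ []) (d : PySem.Dict String Int)
    (hnd : d.keys.Nodup) : cumStepA ls d = (accPair ls (d, 0)).1 := by
  obtain ⟨x, xs, rfl⟩ := List.exists_cons_of_ne_nil hls
  have hfirst : PySem.List.pyGetD (x::xs) (0:Int) "" = x := by
    simpa using PySem.List.pyGetD_natCast (x::xs) 0 ""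
  simp only [cumStepA, accPair, List.foldl_cons, hfirst]
  cases hg : d.get? x with
  | none =>
    simp only [Option.isNone_none, if_true,
      PySem.Dict.getD_of_get?_eq_none d 0 hg, add_zero]
    have h := loopAB xs (x::xs) 0 (d.insert x 0) 0 rfl
      (by simp [PySem.Dict.getD_insert_self d x 0 0])
    rw [show ((0:Nat):Int)+1 = (1:Int) from by norm_num] at h
    exact h
  | some v =>
    simp only [Option.isNone_some, Bool.false_eq_true, if_false,
      PySem.Dict.getD_of_get?_eq_some d 0 hg, zero_add,
      insert_get?_self d x v hnd hg]
    have h := loopAB xs (x::xs) 0 d v rfl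
      (by simp [PySem.Dict.getD_of_get?_eq_some d 0 hg])
    rw [show ((0:Nat):Int)+1 = (1:Int) from by norm_num] at h
    exact h

-- Column independence of B's interchanged loop: folding the dates over the whole
-- (dicts, totals) state acts on each (dict, total) pair separately as accPair.
theorem colStep_fold (ls : List String) :
    ∀ (prs : List (PySem.Dict String Int × Int)),
    ls.foldl colStep (prs.map Prod.fst, prs.map Prod.snd)
      = ((prs.map (accPair ls)).map Prod.fst, (prs.map (accPair ls)).map Prod.snd) := by
  induction ls with
  | nil => intro prs; simp [accPair]
  | cons date rest ih =>
    intro prs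
    have hstep : colStep (prs.map Prod.fst, prs.map Prod.snd) date
        = ((prs.map (fun q => (q.1.insert date (q.2 + q.1.getD date 0),
              q.2 + q.1.getD date 0))).map Prod.fst,
           (prs.map (fun q => (q.1.insert date (q.2 + q.1.getD date 0),
              q.2 + q.1.getD date 0))).map Prod.snd) := by
      simp [colStep, List.zip_map', List.map_map, Function.comp_def]
    rw [List.foldl_cons, hstep, ih]
    have : (prs.map (fun q => (q.1.insert date (q.2 + q.1.getD date 0),
              q.2 + q.1.getD date 0))).map (accPair rest)
        = prs.map (accPair (date :: rest)) := by
      rw [List.map_map]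
      exact List.map_congr_left (fun q _ => rfl)
    rw [this]

-- ===== VERDICT (by name: the statement is the Claim_ definition above) =====
theorem cumulate_data_spec : Claim_equal_cumulate_data := by
  intro data ls _ hpre
  unfold Spec_cumulate_data cumulate_data cumulate_data_alt
  rcases hpre with ⟨hne, hnd⟩
  rcases data with _ | ⟨d0, rest⟩
  · simpa using congrArg (fun p => List.map PySem.Dict.items p.1) (colStep_fold ls [])
  · have hls : ls ≠ [] := hne.resolve_left (by simp)
    dsimp only
    have hmk : (d0 :: rest).map PySem.Dict.mk
        = ((d0 :: rest).map (fun d => (PySem.Dict.mk d, (0:Int)))).map Prod.fst := by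
      simp [List.map_map, Function.comp_def]
    have hrep : (List.replicate (d0 :: rest).length (0:Int))
        = ((d0 :: rest).map (fun d => (PySem.Dict.mk d, (0:Int)))).map Prod.snd := by
      simp [List.map_map, Function.comp_def, List.map_const', List.replicate_succ]
    rw [hmk, hrep, colStep_fold ls]
    simp only [List.map_map]
    refine List.map_congr_left ?_
    intro d hd
    simp only [Function.comp_def]
    rw [stepA_eq_acc ls hls (PySem.Dict.mk d) (hnd d hd)]
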